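-- pv_equiv track=rewrite | github.com/signalnine/tildebin | scripts/baremetal/hugepage_monitor.py | parse_meminfo_hugepages
-- ===== SOURCE A (Python) =====
-- from typing import Any
--
-- def parse_meminfo_hugepages(content: str) -> dict[str, Any]:
--     """Parse /proc/meminfo for hugepage information."""
--     hugepages: dict[str, Any] = {
--         'total': 0,
--         'free': 0,
--         'reserved': 0,
--         'surplus': 0,
--         'pagesize_kb': 2048,  # Default 2MB
--     }
--
--     for line in content.strip().split('\n'):
--         if ':' in line:
--             key, value = line.split(':', 1)
--             key = key.strip()
--             value_parts = value.strip().split()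
--             try:
--                 num_value = int(value_parts[0])
--             except (ValueError, IndexError):
--                 continue
--
--             if key == 'HugePages_Total':
--                 hugepages['total'] = num_value
--             elif key == 'HugePages_Free':
--                 hugepages['free'] = num_value
--             elif key == 'HugePages_Rsvd':
--                 hugepages['reserved'] = num_value
--             elif key == 'HugePages_Surp':
--                 hugepages['surplus'] = num_value
--             elif key == 'Hugepagesize':
--                 hugepages['pagesize_kb'] = num_value
--
--     # Calculate derived values
--     hugepages['used'] = hugepages['total'] - hugepages['free']
--     hugepages['available'] = hugepages['free'] - hugepages['reserved']
--     hugepages['total_kb'] = hugepages['total'] * hugepages['pagesize_kb']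
--     hugepages['used_kb'] = hugepages['used'] * hugepages['pagesize_kb']
--     hugepages['free_kb'] = hugepages['free'] * hugepages['pagesize_kb']
--
--     return hugepages
-- ===== SOURCE B (Python) =====
-- def parse_meminfo_hugepages(content: str) -> dict:
--     """Parse /proc/meminfo for hugepage information.
--
--     Per-key extraction: each wanted key is fetched by scanning the lines
--     backwards and returning the first parsable value (= last occurrence),
--     with a default if the key never parses; no mutable result dict and no
--     per-line key branching.
--     """
--     lines = content.strip().split('\n')
--
--     def last_value(key, default):
--         for line in reversed(lines):
--             head, sep, tail = line.partition(':')
--             if sep and head.strip() == key: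
--                 words = tail.strip().split()
--                 if words:
--                     try:
--                         return int(words[0])
--                     except ValueError:
--                         pass
--         return default
--
--     total = last_value('HugePages_Total', 0)
--     free = last_value('HugePages_Free', 0)
--     reserved = last_value('HugePages_Rsvd', 0)
--     surplus = last_value('HugePages_Surp', 0)
--     pagesize = last_value('Hugepagesize', 2048)
--     used = total - free
--     return {
--         'total': total,
--         'free': free,
--         'reserved': reserved,
--         'surplus': surplus,
--         'pagesize_kb': pagesize,
--         'used': used,
--         'available': free - reserved,
--         'total_kb': total * pagesize,
--         'used_kb': used * pagesize,
--         'free_kb': free * pagesize,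
--     }
-- ===== Notes on version B (the rewrite author's own statement) =====
-- stated objective: alternative
-- what changed: B replaces A's single forward pass that mutates a result dict through a five-way key branch by five independent per-key extractions, each scanning the lines backwards and early-returning the first parsable occurrence (= A's last-wins), with a per-key default; no mutable dict and no per-line branching.
import Mathlib
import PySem

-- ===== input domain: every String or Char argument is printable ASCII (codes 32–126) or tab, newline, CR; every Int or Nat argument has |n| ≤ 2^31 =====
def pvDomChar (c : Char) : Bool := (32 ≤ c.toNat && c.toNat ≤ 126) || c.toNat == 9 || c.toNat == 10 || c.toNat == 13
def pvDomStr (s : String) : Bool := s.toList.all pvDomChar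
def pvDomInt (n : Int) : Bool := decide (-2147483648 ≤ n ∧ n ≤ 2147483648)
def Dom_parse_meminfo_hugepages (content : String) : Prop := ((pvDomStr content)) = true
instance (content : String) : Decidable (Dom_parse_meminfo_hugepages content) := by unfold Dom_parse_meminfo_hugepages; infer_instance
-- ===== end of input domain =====

-- B replaces A's single forward pass with a mutable result dict and a five-way key branch by
-- five independent backward scans (one per wanted key, early-exit on the last parsable
-- occurrence); same O(n) class, different algorithm/decomposition ('alternative').

-- ===== PORT A =====
-- A's loop body: ':' in line; key, value = line.split(':', 1); key.strip(); value.strip().split();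
-- int(parts[0]) or continue (ValueError/IndexError); five-way branch on the key.
def pmhStepA (hp : PySem.Dict String Int) (line : String) : PySem.Dict String Int :=
  if PySem.Str.isIn ":" line then
    match PySem.Str.splitMax? line ":" 1 with
    | some (key :: value :: _) =>
      let key := PySem.Str.strip key
      match PySem.Str.split₀ (PySem.Str.strip value) with
      | [] => hp
      | w :: _ =>
        match PySem.Int.ofStr? w with
        | none => hp
        | some num_value =>
          if key = "HugePages_Total" then hp.insert "total" num_value
          else if key = "HugePages_Free" then hp.insert "free" num_value
          else if key = "HugePages_Rsvd" then hp.insert "reserved" num_value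
          else if key = "HugePages_Surp" then hp.insert "surplus" num_value
          else if key = "Hugepagesize" then hp.insert "pagesize_kb" num_value
          else hp
    | _ => hp
  else hp

def parse_meminfo_hugepages (content : String) : List (String × Int) :=
  let hugepages : PySem.Dict String Int :=
    ((((PySem.Dict.empty.insert "total" 0).insert "free" 0).insert "reserved" 0).insert
      "surplus" 0).insert "pagesize_kb" 2048
  -- content.strip().split('\n'): sep "\n" is non-empty, so split? is always some
  let hugepages :=
    ((PySem.Str.split? (PySem.Str.strip content) "\n").getD []).foldl pmhStepA hugepages
  -- hugepages['k'] reads: the five keys are always present in A's dict, so getD is exact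
  let hugepages := hugepages.insert "used" (hugepages.getD "total" 0 - hugepages.getD "free" 0)
  let hugepages := hugepages.insert "available" (hugepages.getD "free" 0 - hugepages.getD "reserved" 0)
  let hugepages := hugepages.insert "total_kb" (hugepages.getD "total" 0 * hugepages.getD "pagesize_kb" 0)
  let hugepages := hugepages.insert "used_kb" (hugepages.getD "used" 0 * hugepages.getD "pagesize_kb" 0)
  let hugepages := hugepages.insert "free_kb" (hugepages.getD "free" 0 * hugepages.getD "pagesize_kb" 0)
  hugepages.items

-- ===== PORT B =====
-- B's inner loop 'for line in reversed(lines)' with early return: structural recursion over the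
-- reversed line list.  line.partition(':') is ported as split(':', 1): for the one-char separator
-- they agree whenever ':' occurs, and partition's falsy sep (no ':') is exactly the
-- single-part case, which the `| _ =>` arm skips.
def pmhLook (key : String) : List String → Option Int
  | [] => none
  | line :: rest =>
    match PySem.Str.splitMax? line ":" 1 with
    | some (head :: tail :: _) =>
      if PySem.Str.strip head = key then
        match PySem.Str.split₀ (PySem.Str.strip tail) with
        | [] => pmhLook key rest
        | w :: _ =>
          match PySem.Int.ofStr? w with
          | some n => some n
          | none => pmhLook key rest
      else pmhLook key rest
    | _ => pmhLook key rest

def parse_meminfo_hugepages_alt (content : String) : List (String × Int) :=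
  let lines := (PySem.Str.split? (PySem.Str.strip content) "\n").getD []
  let rev := lines.reverse
  let total := (pmhLook "HugePages_Total" rev).getD 0
  let free := (pmhLook "HugePages_Free" rev).getD 0
  let reserved := (pmhLook "HugePages_Rsvd" rev).getD 0
  let surplus := (pmhLook "HugePages_Surp" rev).getD 0
  let pagesize := (pmhLook "Hugepagesize" rev).getD 2048
  let used := total - free
  [("total", total), ("free", free), ("reserved", reserved), ("surplus", surplus),
   ("pagesize_kb", pagesize), ("used", used), ("available", free - reserved),
   ("total_kb", total * pagesize), ("used_kb", used * pagesize), ("free_kb", free * pagesize)]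

-- ===== PRECONDITION & SPEC =====
def Spec_parse_meminfo_hugepages (content : String) (out : List (String × Int)) : Prop := out = parse_meminfo_hugepages_alt content
instance (content : String) (out : List (String × Int)) : Decidable (Spec_parse_meminfo_hugepages content out) := by unfold Spec_parse_meminfo_hugepages; infer_instance

-- ===== CLAIM =====
def Claim_equal_parse_meminfo_hugepages : Prop := ∀ (content : String), Dom_parse_meminfo_hugepages content → Spec_parse_meminfo_hugepages content (parse_meminfo_hugepages content)

-- ===== LEMMAS AND PROOFS =====

-- what one line contributes for a given wanted key (proof-side view of pmhLook's body)
def pmhLine (key line : String) : Option Int :=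
  match PySem.Str.splitMax? line ":" 1 with
  | some (head :: tail :: _) =>
    if PySem.Str.strip head = key then
      match PySem.Str.split₀ (PySem.Str.strip tail) with
      | [] => none
      | w :: _ =>
        match PySem.Int.ofStr? w with
        | some n => some n
        | none => none
    else none
  | _ => none

lemma pmhLook_cons (key line : String) (rest : List String) :
    pmhLook key (line :: rest) = (pmhLine key line).or (pmhLook key rest) := by
  conv_lhs => rw [pmhLook]
  unfold pmhLine
  cases hsp : PySem.Str.splitMax? line ":" 1 with
  | none => simp
  | some parts =>
    match parts with
    | [] => simp
    | [k] => simp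
    | k :: v :: r =>
      by_cases hk : PySem.Str.strip k = key
      · simp only [hk]
        cases hw : PySem.Str.split₀ (PySem.Str.strip v) with
        | nil => simp
        | cons w ws =>
          cases hn : PySem.Int.ofStr? w with
          | none => simp [hn]
          | some n => simp [hn]
      · simp [hk]

lemma pmhLook_append (key : String) (xs ys : List String) :
    pmhLook key (xs ++ ys) = (pmhLook key xs).or (pmhLook key ys) := by
  induction xs with
  | nil => simp [pmhLook]
  | cons x rest ih => simp [pmhLook_cons, ih, Option.or_assoc]

-- the five values B extracts, against defaults
def pmhExt (ls : List String) (v : Int × Int × Int × Int × Int) : Int × Int × Int × Int × Int :=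
  ((pmhLook "HugePages_Total" ls.reverse).getD v.1,
   (pmhLook "HugePages_Free" ls.reverse).getD v.2.1,
   (pmhLook "HugePages_Rsvd" ls.reverse).getD v.2.2.1,
   (pmhLook "HugePages_Surp" ls.reverse).getD v.2.2.2.1,
   (pmhLook "Hugepagesize" ls.reverse).getD v.2.2.2.2)

-- A's five-key result dict holding those values
def pmhMkD (v : Int × Int × Int × Int × Int) : PySem.Dict String Int :=
  PySem.Dict.mk [("total", v.1), ("free", v.2.1), ("reserved", v.2.2.1),
                 ("surplus", v.2.2.2.1), ("pagesize_kb", v.2.2.2.2)]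

-- if the (single-char) separator never occurs, the splitter returns one piece
lemma pmh_go_nomem (c : Char) (fuel : Nat) (m : Nat) (l cur : List Char) (acc : List (List Char))
    (hmem : c ∉ l) (hf : l.length < fuel) :
    PySem.Chars.splitOnMax.go [c] fuel m l cur acc = ((cur.reverse ++ l) :: acc).reverse := by
  induction fuel generalizing m l cur acc with
  | zero => omega
  | succ n ih =>
    cases l with
    | nil => simp [PySem.Chars.splitOnMax.go]
    | cons x rest =>
      have hx : c ≠ x := fun h => hmem (h ▸ List.mem_cons_self)
      have hpre : [c].isPrefixOf (x :: rest) = false := by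
        simp [List.isPrefixOf, hx]
      by_cases hm : m = 0
      · subst hm; rfl
      · have hstep : PySem.Chars.splitOnMax.go [c] (n+1) m (x :: rest) cur acc
            = PySem.Chars.splitOnMax.go [c] n m rest (x :: cur) acc := by
          conv_lhs => rw [PySem.Chars.splitOnMax.go]
          simp [hm, hpre]
        rw [hstep, ih m rest (x :: cur) acc (fun h => hmem (List.mem_cons_of_mem _ h))
            (by simpa using Nat.lt_of_succ_lt_succ hf)]
        simp

-- no ':' in line → split(':', 1) returns the whole line as its single part
lemma pmh_split_no_colon (line : String) (h : PySem.Str.isIn ":" line = false) :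
    PySem.Str.splitMax? line ":" 1 = some [line] := by
  have h' : PySem.Chars.isIn (":").toList line.toList = false := h
  have hmem : ':' ∉ line.toList := by
    intro hc
    obtain ⟨as, bs, hl⟩ := List.append_of_mem hc
    have hinf : (":").toList <:+: line.toList := ⟨as, bs, by rw [hl]; simp⟩
    rw [(PySem.Chars.isIn_iff_infix _ _).2 hinf] at h'
    cases h'
  show Option.map _ (PySem.Chars.splitMax? line.toList (":").toList 1) = _
  have hs : PySem.Chars.splitMax? line.toList [':'] 1
      = some (PySem.Chars.splitOnMax line.toList [':'] 1) := by
    simp [PySem.Chars.splitMax?]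
  rw [show (":").toList = [':'] from rfl, hs, PySem.Chars.splitOnMax]
  rw [if_neg (by norm_num)]
  rw [show (1 : Int).toNat = 1 from rfl,
      pmh_go_nomem ':' (line.toList.length + 1) 1 line.toList [] [] hmem (by omega)]
  simp [String.ofList_toList]

-- one line: A's update of its five-field dict is the per-key single-line contribution
lemma pmh_step_eq (v : Int × Int × Int × Int × Int) (line : String) :
    pmhStepA (pmhMkD v) line = pmhMkD (pmhExt [line] v) := by
  have hrev : ([line] : List String).reverse = [line] := rfl
  unfold pmhStepA
  have hlook : ∀ key, pmhLook key [line] = pmhLine key line := by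
    intro key; rw [show [line] = line :: ([] : List String) from rfl, pmhLook_cons]
    simp [pmhLook]
  cases hin : PySem.Str.isIn ":" line with
  | false =>
    simp [pmhExt, hrev, hlook, pmhLine, pmh_split_no_colon line hin]
  | true =>
    cases hsp : PySem.Str.splitMax? line ":" 1 with
    | none => simp [pmhExt, hrev, hlook, pmhLine, hsp]
    | some parts =>
      match parts with
      | [] => simp [pmhExt, hrev, hlook, pmhLine, hsp]
      | [k] => simp [pmhExt, hrev, hlook, pmhLine, hsp]
      | k :: t :: r =>
        cases hw : PySem.Str.split₀ (PySem.Str.strip t) with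
        | nil => simp [pmhExt, hrev, hlook, pmhLine, hsp, hw]
        | cons w ws =>
          cases hn : PySem.Int.ofStr? w with
          | none => simp [pmhExt, hrev, hlook, pmhLine, hsp, hw, hn]
          | some n =>
            simp only [pmhExt, hrev, hlook, pmhLine, hsp, hw, hn]
            by_cases h1 : PySem.Str.strip k = "HugePages_Total"
            · simp [h1, pmhMkD, PySem.Dict.insert]
            · by_cases h2 : PySem.Str.strip k = "HugePages_Free"
              · simp [h2, pmhMkD, PySem.Dict.insert]
              · by_cases h3 : PySem.Str.strip k = "HugePages_Rsvd"
                · simp [h3, pmhMkD, PySem.Dict.insert]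
                · by_cases h4 : PySem.Str.strip k = "HugePages_Surp"
                  · simp [h4, pmhMkD, PySem.Dict.insert]
                  · by_cases h5 : PySem.Str.strip k = "Hugepagesize"
                    · simp [h5, pmhMkD, PySem.Dict.insert]
                    · simp [h1, h2, h3, h4, h5]

lemma pmh_ext_cons (l : String) (rest : List String) (v : Int × Int × Int × Int × Int) :
    pmhExt (l :: rest) v = pmhExt rest (pmhExt [l] v) := by
  have h : ∀ key (d : Int),
      (pmhLook key (rest.reverse ++ [l])).getD d
        = (pmhLook key rest.reverse).getD ((pmhLook key [l]).getD d) := by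
    intro key d
    rw [pmhLook_append]
    cases pmhLook key rest.reverse <;> simp
  simp [pmhExt, h]

lemma pmh_fold_eq (ls : List String) (v : Int × Int × Int × Int × Int) :
    ls.foldl pmhStepA (pmhMkD v) = pmhMkD (pmhExt ls v) := by
  induction ls generalizing v with
  | nil => simp [pmhExt, pmhLook]
  | cons l rest ih =>
    rw [List.foldl_cons, pmh_step_eq v l, ih, ← pmh_ext_cons]

-- ===== VERDICT =====
theorem parse_meminfo_hugepages_spec : Claim_equal_parse_meminfo_hugepages := by
  intro content _
  show parse_meminfo_hugepages content = parse_meminfo_hugepages_alt content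
  have hinit : ((((PySem.Dict.empty.insert "total" (0:Int)).insert "free" 0).insert "reserved" 0).insert
      "surplus" 0).insert "pagesize_kb" 2048 = pmhMkD (0, 0, 0, 0, 2048) := by
    simp [pmhMkD, PySem.Dict.insert, PySem.Dict.empty]
  simp only [parse_meminfo_hugepages, parse_meminfo_hugepages_alt, hinit, pmh_fold_eq]
  set ls := (PySem.Str.split? (PySem.Str.strip content) "\n").getD [] with hls
  set v := pmhExt ls (0, 0, 0, 0, 2048) with hv
  obtain ⟨t, f, r, s, p⟩ := v
  simp only [pmhExt, Prod.mk.injEq] at hv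
  rw [← hv.1, ← hv.2.1, ← hv.2.2.1, ← hv.2.2.2.1, ← hv.2.2.2.2]
  simp [pmhMkD, PySem.Dict.insert, PySem.Dict.getD, PySem.Dict.get?]
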